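-- pv_equiv track=rewrite | github.com/innovationgarage/sakstig | sakstig/functions/arithmetic.py | non_cast_len
-- ===== SOURCE A (Python) =====
-- def non_cast_len(lst):
--     l = 0
--     res = None
--     for item in lst:
--         if res is None:
--             res = item
--             if res is not None: l += 1
--         else:
--             try:
--                 res + item
--                 l += 1
--             except:
--                 pass
--     return l
-- ===== SOURCE B (Python) =====
-- def non_cast_len(lst):
--     # On lists of integers every element is addable to the first non-None
--     # element and no element is None, so the count is simply the length.
--     return len(lst)
-- ===== Notes on version B (the rewrite author's own statement) =====
-- stated objective: faster
-- what changed: Replaced A's flag-driven pass (latch first non-None element, try-add each later item) by the closed form len(lst), valid because on lists of ints no element is None and int addition never raises.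
import Mathlib
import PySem

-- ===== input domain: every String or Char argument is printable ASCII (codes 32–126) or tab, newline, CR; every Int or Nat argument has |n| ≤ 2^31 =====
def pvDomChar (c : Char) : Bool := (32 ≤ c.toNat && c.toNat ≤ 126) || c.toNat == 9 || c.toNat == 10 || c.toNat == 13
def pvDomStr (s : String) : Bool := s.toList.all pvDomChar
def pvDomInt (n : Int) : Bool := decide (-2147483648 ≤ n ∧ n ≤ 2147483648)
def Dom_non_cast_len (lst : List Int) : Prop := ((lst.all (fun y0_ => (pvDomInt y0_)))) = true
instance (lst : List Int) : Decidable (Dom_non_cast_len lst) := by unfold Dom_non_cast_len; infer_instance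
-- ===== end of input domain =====

-- B replaces A's flag-driven counting pass by the closed form len(lst): on lists of ints
-- no element is None and int addition never raises, so every element is counted (faster: O(1) vs O(n)).

-- ===== PORT A =====
-- state (l, res): res is the latched first non-None element (Option Int mirrors Python's None)
def non_cast_len (lst : List Int) : Int :=
  (lst.foldl
    (fun (st : Int × Option Int) item =>
      match st with
      | (l, none) =>
        -- res = item; item is an int, so `res is not None` holds and l += 1
        (l + 1, some item)
      | (l, some res) =>
        -- res + item on ints never raises, so l += 1
        (l + 1, some res))
    (0, none)).1

-- ===== PORT B =====
-- closed form: len(lst)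
def non_cast_len_alt (lst : List Int) : Int := (lst.length : Int)

-- ===== PRECONDITION & SPEC =====
def Spec_non_cast_len (lst : List Int) (out : Int) : Prop := out = non_cast_len_alt lst
instance (lst : List Int) (out : Int) : Decidable (Spec_non_cast_len lst out) := by unfold Spec_non_cast_len; infer_instance

-- ===== CLAIM (what is proved, stated in full; the proofs are below) =====
def Claim_equal_non_cast_len : Prop := ∀ (lst : List Int), Dom_non_cast_len lst → Spec_non_cast_len lst (non_cast_len lst)

-- ===== LEMMAS AND PROOFS =====
-- A's fold only ever increments the counter, whatever the Option state is
theorem nclA_foldl (lst : List Int) (l : Int) (r : Option Int) :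
    (lst.foldl (fun (st : Int × Option Int) item =>
      match st with
      | (l, none) => (l + 1, some item)
      | (l, some res) => (l + 1, some res)) (l, r)).1 = l + lst.length := by
  induction lst generalizing l r with
  | nil => simp
  | cons x xs ih =>
    cases r <;> simp [List.foldl, ih] <;> ring

-- ===== VERDICT (by name: the statement is the Claim_ definition above) =====
theorem non_cast_len_spec : Claim_equal_non_cast_len := by
  intro lst _
  unfold Spec_non_cast_len non_cast_len non_cast_len_alt
  simp [nclA_foldl]
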